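-- pv_equiv track=rewrite | github.com/cVoltic/Data_Proj | PythonExp/names.py | convert_email_to_name
-- ===== SOURCE A (Python) =====
-- email_list = ['wendy.fleming@test.com',
-- 							'stacy.smith@test.com',
-- 							'harold.miller@example.com',
-- 							'wendy.smith@test.com',
-- 							'stacy.moorehall@test.com',
-- 							'harold.meadows@test.com',
--             ]
--
-- def convert_email_to_name (email_list):
--
--
-- 	#split first and last name for capitalization
-- 	first_name = []
-- 	last_name = []
--
-- 	#truncate everything after @
-- 	email_list_trunc = []
-- 	symbol ='@'
-- 	for i,x in enumerate(email_list):
-- 		#split first and last name for reordering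
-- 		name = x.split(symbol, 1)[0].split('.')
-- 		first_name.append(name[0].capitalize())
-- 		last_name.append(name[1].capitalize())
--
--
-- 		email_list_trunc.append(first_name[i]+" "+last_name[i])
--
-- 	#sorting by last name
-- 	name_list = sorted(email_list_trunc, key=lambda x:x.split(" ")[-1])
--
-- 	return name_list
-- ===== SOURCE B (Python) =====
-- def _insert(pair, acc):
--     # insert pair into acc (sorted by key, stable: after equal keys)
--     if not acc:
--         return [pair]
--     if pair[0] < acc[0][0]:
--         return [pair] + acc
--     return [acc[0]] + _insert(pair, acc[1:])
--
--
-- def convert_email_to_name(email_list):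
--     # online insertion sort: keep a sorted accumulator of (key, name) pairs
--     sorted_pairs = []
--     for email in email_list:
--         local = email.split('@', 1)[0].split('.')
--         first = local[0].capitalize()
--         last = local[1].capitalize()
--         key = last.split(' ')[-1]
--         sorted_pairs = _insert((key, first + ' ' + last), sorted_pairs)
--     return [name for _, name in sorted_pairs]
-- ===== Notes on version B (the rewrite author's own statement) =====
-- stated objective: alternative
-- what changed: B replaces A's build-three-parallel-lists-then-call-sorted pipeline with an online insertion sort: no call to sorted at all; a recursive stable insert places each parsed (key, name) pair into an always-sorted accumulator as the emails are scanned, keying directly on the structured last-name field instead of re-splitting the formatted string.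
import Mathlib
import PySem

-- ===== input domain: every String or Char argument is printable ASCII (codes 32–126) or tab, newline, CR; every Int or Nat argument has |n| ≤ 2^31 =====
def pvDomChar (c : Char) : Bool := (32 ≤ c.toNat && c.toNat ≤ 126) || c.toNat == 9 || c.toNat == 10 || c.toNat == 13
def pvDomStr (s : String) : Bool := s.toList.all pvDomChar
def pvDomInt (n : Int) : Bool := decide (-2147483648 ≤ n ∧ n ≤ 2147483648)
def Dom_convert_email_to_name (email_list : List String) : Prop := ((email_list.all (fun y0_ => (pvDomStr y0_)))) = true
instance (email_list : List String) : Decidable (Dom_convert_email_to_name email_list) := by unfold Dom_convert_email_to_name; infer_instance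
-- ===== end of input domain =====

-- B replaces A's build-lists-then-call-sorted pipeline with an online insertion sort:
-- a recursive stable insert places each parsed (key, name) pair into an always-sorted
-- accumulator as the emails are scanned (objective: alternative algorithm, same cost class not claimed).

-- shared primitives (both Pythons compute these same subexpressions)
-- s.capitalize() — first char uppercased, rest lowered (exact on ASCII)
def pyCapitalize (s : String) : String :=
  match s.toList with
  | [] => ""
  | c :: cs => String.ofList (PySem.Chars.upperChar c :: PySem.Chars.lower cs)

-- email.split('@', 1)[0].split('.')
def pvNameParts (s : String) : List String :=
  (PySem.Str.split? (PySem.List.pyGetD ((PySem.Str.splitMax? s "@" 1).getD []) 0 "") ".").getD []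

-- the sort key lambda x.split(" ")[-1]
def pvLastWordKey (x : String) : String :=
  PySem.List.pyGetD ((PySem.Str.split? x " ").getD []) (-1) ""

-- ===== PORT A =====
-- loop body of A: append to first_name, last_name, then email_list_trunc via the index i
def pvAStep (st : List String × List String × List String) (ix : Int × String) :
    List String × List String × List String :=
  let name := pvNameParts ix.2
  let first_name := st.1 ++ [pyCapitalize (PySem.List.pyGetD name 0 "")]
  let last_name := st.2.1 ++ [pyCapitalize (PySem.List.pyGetD name 1 "")]
  (first_name, last_name,
    st.2.2 ++ [PySem.List.pyGetD first_name ix.1 "" ++ " " ++ PySem.List.pyGetD last_name ix.1 ""])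

def convert_email_to_name (email_list : List String) : List String :=
  let st := (PySem.List.enumerate email_list 0).foldl pvAStep ([], [], [])
  PySem.List.sorted st.2.2 (fun x => pvLastWordKey x) false

-- ===== PORT B =====
-- _insert(pair, acc): recursive stable insert into the sorted accumulator
def pvBInsert (pair : String × String) (acc : List (String × String)) : List (String × String) :=
  match acc with
  | [] => [pair]
  | y :: ys => if pair.1 < y.1 then pair :: y :: ys else y :: pvBInsert pair ys

def convert_email_to_name_alt (email_list : List String) : List String :=
  let sorted_pairs := email_list.foldl (fun acc email =>
    let local_ := pvNameParts email
    let first := pyCapitalize (PySem.List.pyGetD local_ 0 "")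
    let last := pyCapitalize (PySem.List.pyGetD local_ 1 "")
    let key := PySem.List.pyGetD ((PySem.Str.split? last " ").getD []) (-1) ""
    pvBInsert (key, first ++ " " ++ last) acc) []
  sorted_pairs.map (fun p => p.2)

-- ===== PRECONDITION & SPEC =====
-- Pre_: every email's part before the first '@', split on '.', has at least two pieces;
-- otherwise Python A raises IndexError at name[1].
def Pre_convert_email_to_name (email_list : List String) : Prop :=
  ∀ e ∈ email_list, 2 ≤ (pvNameParts e).length
instance (email_list : List String) : Decidable (Pre_convert_email_to_name email_list) := by
  unfold Pre_convert_email_to_name; infer_instance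

def pvWitness_convert_email_to_name : List String :=
  ["wendy.fleming@test.com", "stacy.smith@test.com", "wendy.smith@test.com"]

def Spec_convert_email_to_name (email_list : List String) (out : List String) : Prop :=
  out = convert_email_to_name_alt email_list
instance (email_list : List String) (out : List String) :
    Decidable (Spec_convert_email_to_name email_list out) := by
  unfold Spec_convert_email_to_name; infer_instance

-- ===== CLAIM (what is proved, stated in full; the proofs are below) =====
def Claim_equal_convert_email_to_name : Prop :=
  ∀ (email_list : List String), Dom_convert_email_to_name email_list →
    Pre_convert_email_to_name email_list →
    Spec_convert_email_to_name email_list (convert_email_to_name email_list)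

-- ===== LEMMAS AND PROOFS =====

-- the three per-email values A's parallel lists hold
def pvF (e : String) : String := pyCapitalize (PySem.List.pyGetD (pvNameParts e) 0 "")
def pvG (e : String) : String := pyCapitalize (PySem.List.pyGetD (pvNameParts e) 1 "")
def pvH (e : String) : String := pvF e ++ " " ++ pvG e

-- A's loop invariant: the three lists are maps of the processed prefix
lemma pv_aloop (rest : List String) (pre : List String) :
    (PySem.List.enumerate rest (pre.length : Int)).foldl pvAStep
      (pre.map pvF, pre.map pvG, pre.map pvH)
    = ((pre ++ rest).map pvF, (pre ++ rest).map pvG, (pre ++ rest).map pvH) := by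
  induction rest generalizing pre with
  | nil => simp [PySem.List.enumerate_nil]
  | cons x xs ih =>
    rw [PySem.List.enumerate_cons, List.foldl_cons]
    have hstep : pvAStep (pre.map pvF, pre.map pvG, pre.map pvH) ((pre.length : Int), x)
        = ((pre ++ [x]).map pvF, (pre ++ [x]).map pvG, (pre ++ [x]).map pvH) := by
      show (pre.map pvF ++ [pvF x], pre.map pvG ++ [pvG x],
            pre.map pvH ++ [PySem.List.pyGetD (pre.map pvF ++ [pvF x]) (pre.length : Int) ""
              ++ " " ++ PySem.List.pyGetD (pre.map pvG ++ [pvG x]) (pre.length : Int) ""]) = _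
      have h1 : PySem.List.pyGetD (pre.map pvF ++ [pvF x]) (pre.length : Int) "" = pvF x := by
        simp
      have h2 : PySem.List.pyGetD (pre.map pvG ++ [pvG x]) (pre.length : Int) "" = pvG x := by
        simp
      simp [h1, h2, pvH]
    rw [hstep]
    have hlen : (pre.length : Int) + 1 = ((pre ++ [x]).length : Int) := by
      simp
    rw [hlen, ih (pre ++ [x])]
    simp

-- B's insert is PySem's insertBy on the key component
lemma pv_binsert_eq (p : String × String) (acc : List (String × String)) :
    pvBInsert p acc = PySem.List.insertBy (fun a b => decide (a.1 < b.1)) p acc := by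
  induction acc with
  | nil => simp [pvBInsert, PySem.List.insertBy]
  | cons y ys ih =>
    simp only [pvBInsert, PySem.List.insertBy, ih]
    by_cases h : p.1 < y.1 <;> simp [h]

-- inserting a mapped element into a mapped list
lemma pv_insertBy_map {α β : Type} (m : α → β) (ba : β → β → Bool) (x : α) :
    ∀ ys : List α,
      PySem.List.insertBy ba (m x) (ys.map m)
        = (PySem.List.insertBy (fun a b => ba (m a) (m b)) x ys).map m := by
  intro ys
  induction ys with
  | nil => simp [PySem.List.insertBy]
  | cons y ys ih =>
    simp only [List.map_cons, PySem.List.insertBy]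
    by_cases h : ba (m x) (m y) = true
    · simp [h]
    · simp only [Bool.not_eq_true] at h
      simp [h, ih]

-- fold of insertBy over pairs built by m = maps of the fold of insertBy over names
lemma pv_fold_insert_map (m : String → String × String)
    (l : List String) : ∀ (acc : List String),
    l.foldl (fun acc x => PySem.List.insertBy (fun a b => decide (a.1 < b.1)) (m x) acc)
      (acc.map m)
    = (l.foldl (fun acc x =>
        PySem.List.insertBy (fun a b => decide ((m a).1 < (m b).1)) x acc) acc).map m := by
  induction l with
  | nil => intro acc; simp
  | cons x xs ih =>
    intro acc
    simp only [List.foldl_cons]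
    rw [pv_insertBy_map m (fun a b => decide (a.1 < b.1)) x acc]
    exact ih _

-- single-space split, written structurally (the shape splitOn.go computes for sep = [' '])
def pvSplitSp (pre : List Char) : List Char → List (List Char)
  | [] => [pre]
  | c :: rest => if c = ' ' then pre :: pvSplitSp [] rest else pvSplitSp (pre ++ [c]) rest

lemma pv_go_spec : ∀ (fuel : Nat) (l cur : List Char) (acc : List (List Char)),
    l.length < fuel →
    PySem.Chars.splitOn.go [' '] fuel l cur acc = acc.reverse ++ pvSplitSp cur.reverse l := by
  intro fuel
  induction fuel with
  | zero => intro l cur acc h; omega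
  | succ n ih =>
    intro l cur acc h
    cases l with
    | nil => rw [PySem.Chars.splitOn.go.eq_def]; simp [pvSplitSp]
    | cons c rest =>
      rw [PySem.Chars.splitOn.go.eq_def]
      simp only [List.length_cons] at h
      by_cases hc : c = ' '
      · subst hc
        have hp : [' '].isPrefixOf (' ' :: rest) = true := by simp [List.isPrefixOf]
        simp only [hp, if_true, List.length_singleton, List.drop_succ_cons, List.drop_zero]
        rw [ih rest [] (cur.reverse :: acc) (by omega)]
        simp [pvSplitSp]
      · have hpre : [' '].isPrefixOf (c :: rest) = false := by
          simp [List.isPrefixOf]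
          exact fun h' => hc h'.symm
        simp only [hpre, Bool.false_eq_true, if_false]
        rw [ih rest (c :: cur) acc (by omega)]
        simp [pvSplitSp, hc]

lemma pv_splitOn_sp (s : List Char) :
    PySem.Chars.splitOn s [' '] = pvSplitSp [] s := by
  unfold PySem.Chars.splitOn
  rw [pv_go_spec (s.length + 1) s [] [] (by omega)]
  simp

lemma pv_splitSp_append (u : List Char) : ∀ (pre v : List Char),
    pvSplitSp pre (u ++ ' ' :: v) = pvSplitSp pre u ++ pvSplitSp [] v := by
  induction u with
  | nil => intro pre v; simp [pvSplitSp]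
  | cons c u' ih =>
    intro pre v
    by_cases hc : c = ' ' <;> simp [pvSplitSp, hc, ih]

lemma pv_splitSp_ne_nil (v : List Char) : ∀ pre, pvSplitSp pre v ≠ [] := by
  induction v with
  | nil => intro pre; simp [pvSplitSp]
  | cons c rest ih =>
    intro pre
    by_cases hc : c = ' ' <;> simp [pvSplitSp, hc, ih]

-- the formatted name "First Last" sorts by the last word of Last alone
lemma pv_key_fmt (a b : String) : pvLastWordKey (a ++ " " ++ b) = pvLastWordKey b := by
  have hsp : (" " : String).toList = [' '] := by decide
  have hkey : ∀ s : String, pvLastWordKey s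
      = (((pvSplitSp [] s.toList).map String.ofList).getLast?).getD "" := by
    intro s
    unfold pvLastWordKey
    rw [show PySem.Str.split? s " "
        = Option.map (fun x => List.map String.ofList x) (PySem.Chars.split? s.toList [' ']) by
      simp [PySem.Str.split?, hsp]]
    simp [PySem.Chars.split?, pv_splitOn_sp, PySem.List.pyGetD, PySem.List.pyGet?_neg_one]
  rw [hkey, hkey]
  have htl : (a ++ " " ++ b).toList = a.toList ++ ' ' :: b.toList := by
    simp [hsp]
  rw [htl, pv_splitSp_append a.toList [] b.toList, List.map_append, List.getLast?_append]
  rcases h : ((pvSplitSp [] b.toList).map String.ofList).getLast? with _ | z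
  · rw [List.getLast?_eq_none_iff] at h
    simp at h
    exact absurd h (pv_splitSp_ne_nil b.toList [])
  · simp

-- ===== VERDICT (by name: the statement is the Claim_ definition above) =====

theorem convert_email_to_name_spec : Claim_equal_convert_email_to_name := by
  intro el _ _
  unfold Spec_convert_email_to_name convert_email_to_name convert_email_to_name_alt
  have ha := pv_aloop el []
  simp only [List.length_nil, Nat.cast_zero, List.map_nil, List.nil_append] at ha
  rw [ha]
  -- B's fold, rewritten: step inserts m (pvH e) where m s = (pvLastWordKey s, s)
  have hstep : (fun (acc : List (String × String)) (email : String) =>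
      let local_ := pvNameParts email
      let first := pyCapitalize (PySem.List.pyGetD local_ 0 "")
      let last := pyCapitalize (PySem.List.pyGetD local_ 1 "")
      let key := PySem.List.pyGetD ((PySem.Str.split? last " ").getD []) (-1) ""
      pvBInsert (key, first ++ " " ++ last) acc)
      = (fun acc email =>
          PySem.List.insertBy (fun a b => decide (a.1 < b.1))
            ((fun s => (pvLastWordKey s, s)) (pvH email)) acc) := by
    funext acc email
    show pvBInsert (pvLastWordKey (pvG email), pvF email ++ " " ++ pvG email) acc = _
    rw [pv_binsert_eq]
    have : pvLastWordKey (pvG email) = pvLastWordKey (pvH email) := (pv_key_fmt _ _).symm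
    simp only [pvH, this]
  rw [hstep]
  rw [show (el.foldl (fun acc email =>
        PySem.List.insertBy (fun a b => decide (a.1 < b.1))
          ((fun s => (pvLastWordKey s, s)) (pvH email)) acc) [])
      = ((el.map pvH).foldl (fun acc x =>
        PySem.List.insertBy (fun a b => decide (a.1 < b.1))
          ((fun s => (pvLastWordKey s, s)) x) acc) []) from by rw [List.foldl_map]]
  rw [show ([] : List (String × String)) = ([] : List String).map (fun s => (pvLastWordKey s, s)) from rfl]
  rw [pv_fold_insert_map (fun s => (pvLastWordKey s, s)) (el.map pvH) []]
  rw [PySem.List.sorted_eq_foldl_insertBy]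
  simp only [List.map_map]
  rw [show ((fun p : String × String => p.2) ∘ fun s => (pvLastWordKey s, s)) = id from rfl,
    List.map_id]
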